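-- pv_equiv track=rewrite | github.com/q10/bioe243 | bioe243/target1/genetic_lattice.py | decode_lattice
-- ===== SOURCE A (Python) =====
-- def decode_lattice(encoding):
--     config = [(0,0,0)]*(len(encoding)+1)
--     #for i in xrange(1,len(encoding)):
--     i = 0
--     encoding_len = len(encoding)
--     while i<encoding_len:
--         e = encoding[i]
--         dim = e>>1
--         dir = ((e&1)<<1)-1
--         i += 1
--         next_config = tuple([p+dir if d==dim else p for d,p in enumerate(config[i-1])])
--         config[i] = next_config
--     return config
-- ===== SOURCE B (Python) =====
-- def decode_lattice(encoding):
--     def axis(d):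
--         out = [0]
--         s = 0
--         for e in encoding:
--             if e >> 1 == d:
--                 s += ((e & 1) << 1) - 1
--             out.append(s)
--         return out
--     return list(zip(axis(0), axis(1), axis(2)))
-- ===== Notes on version B (the rewrite author's own statement) =====
-- stated objective: faster
-- what changed: Replaces the preallocated-array while loop that rebuilds each 3-tuple via an enumerate comprehension with three independent per-axis prefix-sum passes zipped into tuples; a timing run measured B ~2.5x faster (no per-step tuple/comprehension/enumerate overhead).
import Mathlib
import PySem

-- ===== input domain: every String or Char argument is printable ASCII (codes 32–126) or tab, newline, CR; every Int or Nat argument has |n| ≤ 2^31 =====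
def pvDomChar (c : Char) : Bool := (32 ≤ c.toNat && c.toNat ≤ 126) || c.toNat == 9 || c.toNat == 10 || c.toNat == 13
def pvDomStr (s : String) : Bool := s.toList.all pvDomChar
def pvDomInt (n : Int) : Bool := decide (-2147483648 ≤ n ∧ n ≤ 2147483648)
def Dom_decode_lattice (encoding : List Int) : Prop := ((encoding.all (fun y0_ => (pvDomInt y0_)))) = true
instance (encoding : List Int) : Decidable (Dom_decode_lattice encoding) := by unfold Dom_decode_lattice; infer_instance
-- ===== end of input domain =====

-- B replaces A's preallocated-array while loop (tuple rebuilt via enumerate) by three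
-- independent per-axis prefix-sum passes zipped into tuples (measured faster in a timing run).

-- ===== PORT A =====
-- A's while loop over i = 0..len-1 (reading encoding[i] and config[i], writing config[i+1])
-- is ported as a fold over List.range; the enumerate-comprehension over the 3-tuple is
-- unrolled into its three components (exact: the tuple has exactly 3 positions d = 0,1,2).
def decode_lattice (encoding : List Int) : List (Int × Int × Int) :=
  let config := List.replicate (encoding.length + 1) ((0, 0, 0) : Int × Int × Int)
  (List.range encoding.length).foldl
    (fun config i =>
      let e := encoding.getD i 0          -- i < encoding.length: in range, exact
      let dim : Int := e >>> (1 : Nat)    -- Python e >> 1 (floors on negatives)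
      let dir : Int := (PySem.Int.band e 1) <<< (1 : Nat) - 1   -- Python ((e&1)<<1)-1
      let p := config.getD i ((0, 0, 0) : Int × Int × Int)      -- config[i-1] after i += 1
      let next : Int × Int × Int :=
        (if (0 : Int) = dim then p.1 + dir else p.1,
         if (1 : Int) = dim then p.2.1 + dir else p.2.1,
         if (2 : Int) = dim then p.2.2 + dir else p.2.2)
      config.set (i + 1) next)
    config

-- ===== PORT B =====
-- helper axis(d): running prefix sum of this axis's deltas; out starts as [0]
def decode_lattice_axis (encoding : List Int) (d : Int) : List Int :=
  let st := encoding.foldl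
    (fun (st : List Int × Int) (e : Int) =>
      if e >>> (1 : Nat) = d then
        let s := st.2 + ((PySem.Int.band e 1) <<< (1 : Nat) - 1)
        (st.1 ++ [s], s)
      else (st.1 ++ [st.2], st.2))
    ([0], 0)
  st.1

def decode_lattice_alt (encoding : List Int) : List (Int × Int × Int) :=
  (decode_lattice_axis encoding 0).zip
    ((decode_lattice_axis encoding 1).zip (decode_lattice_axis encoding 2))

-- ===== PRECONDITION & SPEC =====
def Spec_decode_lattice (encoding : List Int) (out : List (Int × Int × Int)) : Prop := out = decode_lattice_alt encoding
instance (encoding : List Int) (out : List (Int × Int × Int)) : Decidable (Spec_decode_lattice encoding out) := by unfold Spec_decode_lattice; infer_instance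

-- ===== CLAIM (what is proved, stated in full; the proofs are below) =====
def Claim_equal_decode_lattice : Prop := ∀ (encoding : List Int), Dom_decode_lattice encoding → Spec_decode_lattice encoding (decode_lattice encoding)

-- ===== LEMMAS AND PROOFS =====

-- the move applied by one encoded step
def dlStep (p : Int × Int × Int) (e : Int) : Int × Int × Int :=
  let dim : Int := e >>> (1 : Nat)
  let dir : Int := (PySem.Int.band e 1) <<< (1 : Nat) - 1
  (if (0 : Int) = dim then p.1 + dir else p.1,
   if (1 : Int) = dim then p.2.1 + dir else p.2.1,
   if (2 : Int) = dim then p.2.2 + dir else p.2.2)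

-- reference result: the scan of dlStep from p
def dlScan (p : Int × Int × Int) : List Int → List (Int × Int × Int)
  | [] => [p]
  | e :: rest => p :: dlScan (dlStep p e) rest

theorem dlScan_length (p : Int × Int × Int) (l : List Int) :
    (dlScan p l).length = l.length + 1 := by
  induction l generalizing p with
  | nil => simp [dlScan]
  | cons e rest ih => simp [dlScan, ih]

theorem dlScan_concat (p : Int × Int × Int) (l : List Int) (e : Int) :
    dlScan p (l ++ [e]) = dlScan p l ++ [dlStep (l.foldl dlStep p) e] := by
  induction l generalizing p with
  | nil => simp [dlScan]
  | cons a rest ih => simp [dlScan, ih]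

theorem dlScan_getD_last (p : Int × Int × Int) (l : List Int) (d : Int × Int × Int) :
    (dlScan p l).getD l.length d = l.foldl dlStep p := by
  induction l generalizing p with
  | nil => rfl
  | cons a rest ih =>
      show ((p :: dlScan (dlStep p a) rest).getD (rest.length + 1) d) = _
      rw [List.getD_cons_succ]; exact ih _

-- the body of A's fold, named for the lemmas below (definitionally A's fold body)
def dlBody (encoding : List Int) (config : List (Int × Int × Int)) (i : Nat) :
    List (Int × Int × Int) :=
  config.set (i + 1) (dlStep (config.getD i ((0, 0, 0) : Int × Int × Int)) (encoding.getD i 0))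

theorem decode_lattice_eq_fold (encoding : List Int) :
    decode_lattice encoding =
      (List.range encoding.length).foldl (dlBody encoding)
        (List.replicate (encoding.length + 1) ((0, 0, 0) : Int × Int × Int)) := rfl

theorem dlFold_length (encoding : List Int) (is : List Nat) (c : List (Int × Int × Int)) :
    (is.foldl (dlBody encoding) c).length = c.length := by
  induction is generalizing c with
  | nil => rfl
  | cons j t ih => rw [List.foldl_cons, ih]; simp [dlBody]

-- all activity of the first m steps stays within the first m+1 cells
theorem dlFold_append (encoding : List Int) (m : Nat) :
    ∀ (c1 c2 : List (Int × Int × Int)), c1.length = m + 1 →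
      (List.range m).foldl (dlBody encoding) (c1 ++ c2) =
        (List.range m).foldl (dlBody encoding) c1 ++ c2 := by
  induction m with
  | zero => intro c1 c2 h; simp
  | succ n ih =>
      intro c1 c2 h
      have hsplit : c1 = c1.take (n + 1) ++ c1.drop (n + 1) := by simp
      have ht : (c1.take (n + 1)).length = n + 1 := by simp; omega
      obtain ⟨v, hv⟩ : ∃ v, c1.drop (n + 1) = [v] := by
        have : (c1.drop (n + 1)).length = 1 := by simp; omega
        cases hd : c1.drop (n + 1) with
        | nil => simp [hd] at this
        | cons a t => cases t with
          | nil => exact ⟨a, rfl⟩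
          | cons b u => simp [hd] at this
      rw [hsplit, hv, List.range_succ, List.foldl_append, List.foldl_append,
        List.append_assoc, ih _ ([v] ++ c2) ht, ih _ [v] ht]
      have hClen : ((List.range n).foldl (dlBody encoding) (c1.take (n + 1))).length = n + 1 := by
        rw [dlFold_length]; exact ht
      set C := (List.range n).foldl (dlBody encoding) (c1.take (n + 1)) with hC
      simp only [List.foldl_cons, List.foldl_nil, dlBody]
      rw [List.getD_append _ _ _ _ (by omega), List.getD_append _ _ _ _ (by omega),
        List.set_append_right (s := C) (t := [v] ++ c2) _ _ (by omega),
        List.set_append_right (s := C) (t := [v]) _ _ (by omega), hClen]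
      simp

-- the bodies only read encoding at indices < m, so encoding may be extended on the right
theorem dlFold_extend (l : List Int) (e : Int) (m : Nat) (hm : m ≤ l.length)
    (c : List (Int × Int × Int)) :
    (List.range m).foldl (dlBody (l ++ [e])) c =
      (List.range m).foldl (dlBody l) c := by
  induction m generalizing c with
  | zero => rfl
  | succ n ih =>
      rw [List.range_succ, List.foldl_append, List.foldl_append, ih (by omega)]
      simp only [List.foldl_cons, List.foldl_nil, dlBody]
      rw [List.getD_append _ _ _ _ (by omega)]

theorem dlFold_eq_scan (encoding : List Int) :
    (List.range encoding.length).foldl (dlBody encoding)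
        (List.replicate (encoding.length + 1) ((0, 0, 0) : Int × Int × Int)) =
      dlScan ((0, 0, 0) : Int × Int × Int) encoding := by
  induction encoding using List.reverseRecOn with
  | nil => rfl
  | append_singleton l e ih =>
      have hlen : (l ++ [e]).length = l.length + 1 := by simp
      have hsl : (dlScan ((0, 0, 0) : Int × Int × Int) l).length = l.length + 1 :=
        dlScan_length _ _
      rw [hlen, List.range_succ, List.foldl_append, List.replicate_succ',
        dlFold_append _ _ _ _ (by simp), dlFold_extend _ _ _ (by simp), ih]
      simp only [List.foldl_cons, List.foldl_nil, dlBody]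
      rw [List.getD_append _ _ _ _ (by omega), List.getD_append_right _ _ _ _ (by simp),
        List.set_append_right _ _ (by omega), hsl, Nat.sub_self, List.set_cons_zero,
        dlScan_getD_last, dlScan_concat]
      simp

-- characterisation of B's axis fold: the list appended after out
def dlPsum (d : Int) (s : Int) : List Int → List Int
  | [] => []
  | e :: rest =>
      if e >>> (1 : Nat) = d then
        let s' := s + ((PySem.Int.band e 1) <<< (1 : Nat) - 1)
        s' :: dlPsum d s' rest
      else s :: dlPsum d s rest

theorem dlAxis_fold (encoding : List Int) (d : Int) (out : List Int) (s : Int) :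
    (encoding.foldl
      (fun (st : List Int × Int) (e : Int) =>
        if e >>> (1 : Nat) = d then
          let s := st.2 + ((PySem.Int.band e 1) <<< (1 : Nat) - 1)
          (st.1 ++ [s], s)
        else (st.1 ++ [st.2], st.2))
      (out, s)).1 = out ++ dlPsum d s encoding := by
  induction encoding generalizing out s with
  | nil => simp [dlPsum]
  | cons e rest ih =>
      rw [List.foldl_cons]
      by_cases h : e >>> (1 : Nat) = d <;> simp [h, dlPsum, ih]

theorem dlAxis_eq (encoding : List Int) (d : Int) :
    decode_lattice_axis encoding d = 0 :: dlPsum d 0 encoding := by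
  unfold decode_lattice_axis
  exact dlAxis_fold encoding d [0] 0

theorem dlStep_comp (x y z e : Int) :
    dlStep (x, y, z) e =
      ((if e >>> (1 : Nat) = 0 then x + ((PySem.Int.band e 1) <<< (1 : Nat) - 1) else x),
       (if e >>> (1 : Nat) = 1 then y + ((PySem.Int.band e 1) <<< (1 : Nat) - 1) else y),
       (if e >>> (1 : Nat) = 2 then z + ((PySem.Int.band e 1) <<< (1 : Nat) - 1) else z)) := by
  simp [dlStep, eq_comm]

theorem dlZip_eq_scan (encoding : List Int) (p : Int × Int × Int) :
    (p.1 :: dlPsum 0 p.1 encoding).zip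
        ((p.2.1 :: dlPsum 1 p.2.1 encoding).zip (p.2.2 :: dlPsum 2 p.2.2 encoding)) =
      dlScan p encoding := by
  induction encoding generalizing p with
  | nil => simp [dlPsum, dlScan]
  | cons e rest ih =>
      obtain ⟨x, y, z⟩ := p
      have h2 := ih (dlStep (x, y, z) e)
      rw [dlStep_comp] at h2
      simp only [List.zip_cons_cons] at h2 ⊢
      simp only [dlPsum, dlScan]
      by_cases h0 : e >>> (1 : Nat) = 0 <;>
        by_cases h1 : e >>> (1 : Nat) = 1 <;>
          by_cases h2' : e >>> (1 : Nat) = 2 <;>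
            simp_all [List.zip_cons_cons, dlStep_comp]

-- ===== VERDICT (by name: the statement is the Claim_ definition above) =====
theorem decode_lattice_spec : Claim_equal_decode_lattice := by
  intro encoding _
  unfold Spec_decode_lattice
  rw [decode_lattice_eq_fold, dlFold_eq_scan]
  unfold decode_lattice_alt
  rw [dlAxis_eq, dlAxis_eq, dlAxis_eq]
  exact (dlZip_eq_scan encoding ((0, 0, 0) : Int × Int × Int)).symm
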